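-- pv_equiv track=rewrite | github.com/Martiin17/TDA_resueltos | DyC/elemento_desordenado.py | elemento_desordenado_rec
-- ===== SOURCE A (Python) =====
-- def elemento_desordenado_rec(arr, inicio, fin):
--     if inicio >= fin:
--         return arr[0]
--
--     mitad = (fin + inicio) // 2
--
--     if mitad+1 < len(arr)-1 and arr[mitad] > arr[mitad+1]:
--         return arr[mitad+1]
--     if mitad-1 >= 0 and arr[mitad-1] > arr[mitad]:
--         return arr[mitad-1]
--
--     lado_izq = elemento_desordenado_rec(arr, inicio, mitad)
--     lado_der = elemento_desordenado_rec(arr, mitad+1, fin)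
--
--     if lado_izq is not None:
--         return lado_izq
--     if lado_der is not None:
--         return lado_der
--     else:
--         return None
-- ===== SOURCE B (Python) =====
-- def elemento_desordenado_rec(arr, inicio, fin):
--     # Iterative left-spine descent: A's recursion computes both halves but always
--     # prefers the left result, which (over int arrays) is never None, so only the
--     # chain of left intervals plus each node's boundary checks determine the result.
--     while inicio < fin:
--         mitad = (fin + inicio) // 2
--         if mitad + 1 < len(arr) - 1 and arr[mitad] > arr[mitad + 1]:
--             return arr[mitad + 1]
--         if mitad - 1 >= 0 and arr[mitad - 1] > arr[mitad]:
--             return arr[mitad - 1]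
--         fin = mitad
--     return arr[0]
-- ===== Notes on version B (the rewrite author's own statement) =====
-- stated objective: simpler
-- what changed: A's two-sided tree recursion (which computes both halves but always prefers the left, never-None result) is replaced by a short iterative while-loop that checks the boundary inversions at each midpoint and then descends into the left interval only.
-- outside the precondition, e.g. on elemento_desordenado_rec([1], -1, 0): A returns 1, B returns 1
import Mathlib
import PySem

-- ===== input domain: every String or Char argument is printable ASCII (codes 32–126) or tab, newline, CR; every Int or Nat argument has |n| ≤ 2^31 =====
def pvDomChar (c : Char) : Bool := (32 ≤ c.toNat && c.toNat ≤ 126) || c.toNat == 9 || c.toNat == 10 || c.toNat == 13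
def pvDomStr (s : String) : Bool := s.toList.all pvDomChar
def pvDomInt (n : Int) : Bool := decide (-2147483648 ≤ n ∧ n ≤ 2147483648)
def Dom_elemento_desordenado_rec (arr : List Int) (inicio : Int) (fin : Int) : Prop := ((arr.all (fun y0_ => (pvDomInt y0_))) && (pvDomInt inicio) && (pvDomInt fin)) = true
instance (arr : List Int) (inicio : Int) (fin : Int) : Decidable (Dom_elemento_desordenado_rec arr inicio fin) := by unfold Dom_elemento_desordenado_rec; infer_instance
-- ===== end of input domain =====

-- B replaces A's two-sided tree recursion (which always prefers the left result) by a
-- single iterative descent along the left spine of intervals; objective: simpler.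
-- In both ports the element comparisons inside the boundary guards use pyGetD with
-- default 0: inside Pre_ every such access is in range, so this is exact there.

-- ===== PORT A =====
-- A's recursion, transcribed with a structural fuel counter equal to its own
-- termination measure (fin - inicio).toNat; each recursive call strictly decreases
-- that measure, so the fuel never runs out before the inicio ≥ fin base case.
def pvGoA (arr : List Int) (fuel : Nat) (inicio : Int) (fin : Int) : Option Int :=
  match fuel with
  | 0 => PySem.List.pyGet? arr 0
  | n + 1 =>
    if inicio ≥ fin then PySem.List.pyGet? arr 0
    else
      let mitad := PySem.Int.floordiv (fin + inicio) 2
      if mitad + 1 < (arr.length : Int) - 1 ∧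
          PySem.List.pyGetD arr mitad 0 > PySem.List.pyGetD arr (mitad + 1) 0 then
        PySem.List.pyGet? arr (mitad + 1)
      else if mitad - 1 ≥ 0 ∧
          PySem.List.pyGetD arr (mitad - 1) 0 > PySem.List.pyGetD arr mitad 0 then
        PySem.List.pyGet? arr (mitad - 1)
      else
        let lado_izq := pvGoA arr n inicio mitad
        let lado_der := pvGoA arr n (mitad + 1) fin
        if lado_izq.isSome then lado_izq
        else if lado_der.isSome then lado_der
        else none

def elemento_desordenado_rec (arr : List Int) (inicio : Int) (fin : Int) : Option Int :=
  pvGoA arr (fin - inicio).toNat inicio fin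

-- ===== PORT B =====
-- B's helper _check: the boundary-inversion test at one midpoint (none = no hit)
def pvCheck (arr : List Int) (mitad : Int) : Option Int :=
  if mitad + 1 < (arr.length : Int) - 1 ∧
      PySem.List.pyGetD arr mitad 0 > PySem.List.pyGetD arr (mitad + 1) 0 then
    PySem.List.pyGet? arr (mitad + 1)
  else if mitad - 1 ≥ 0 ∧
      PySem.List.pyGetD arr (mitad - 1) 0 > PySem.List.pyGetD arr mitad 0 then
    PySem.List.pyGet? arr (mitad - 1)
  else none

-- B's while-loop, the same fuel convention (each pass shrinks the interval)
def pvGoB (arr : List Int) (fuel : Nat) (inicio : Int) (fin : Int) : Option Int :=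
  match fuel with
  | 0 => PySem.List.pyGet? arr 0
  | n + 1 =>
    if inicio < fin then
      let mitad := PySem.Int.floordiv (fin + inicio) 2
      match pvCheck arr mitad with
      | some hit => some hit
      | none => pvGoB arr n inicio mitad
    else PySem.List.pyGet? arr 0

def elemento_desordenado_rec_alt (arr : List Int) (inicio : Int) (fin : Int) : Option Int :=
  pvGoB arr (fin - inicio).toNat inicio fin

-- ===== PRECONDITION & SPEC =====
-- Pre_ excludes calls whose interval leaves [0, len(arr)] (and the empty list): there the
-- recursion's arr[mitad]-style accesses generally raise IndexError, or survive only through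
-- Python's negative-index wraparound, an accident of A's implementation no caller relies on.
def Pre_elemento_desordenado_rec (arr : List Int) (inicio : Int) (fin : Int) : Prop :=
  arr ≠ [] ∧ (inicio ≥ fin ∨ (0 ≤ inicio ∧ fin ≤ (arr.length : Int)))
instance (arr : List Int) (inicio : Int) (fin : Int) : Decidable (Pre_elemento_desordenado_rec arr inicio fin) := by unfold Pre_elemento_desordenado_rec; infer_instance

def pvWitness_elemento_desordenado_rec : List Int × Int × Int := ([3, 1, 2], 0, 2)

def Spec_elemento_desordenado_rec (arr : List Int) (inicio : Int) (fin : Int) (out : Option Int) : Prop := out = elemento_desordenado_rec_alt arr inicio fin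
instance (arr : List Int) (inicio : Int) (fin : Int) (out : Option Int) : Decidable (Spec_elemento_desordenado_rec arr inicio fin out) := by unfold Spec_elemento_desordenado_rec; infer_instance

-- ===== CLAIM (what is proved, stated in full; the proofs are below) =====
def Claim_equal_elemento_desordenado_rec : Prop := ∀ (arr : List Int) (inicio : Int) (fin : Int), Dom_elemento_desordenado_rec arr inicio fin → Pre_elemento_desordenado_rec arr inicio fin → Spec_elemento_desordenado_rec arr inicio fin (elemento_desordenado_rec arr inicio fin)


-- ===== LEMMAS AND PROOFS =====

theorem pvGetSome (arr : List Int) (k : Int) (h0 : 0 ≤ k) (h1 : k < (arr.length : Int)) :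
    ∃ v, PySem.List.pyGet? arr k = some v :=
  ⟨arr[k.toNat]'(by omega), by
    rw [PySem.List.pyGet?_of_nonneg arr h0]; exact List.getElem?_eq_getElem (by omega)⟩

theorem pvMain (arr : List Int) : ∀ (n : Nat) (inicio fin : Int),
    (fin - inicio).toNat ≤ n → Pre_elemento_desordenado_rec arr inicio fin →
    (pvGoA arr n inicio fin).isSome = true ∧
    pvGoA arr n inicio fin = pvGoB arr n inicio fin := by
  intro n
  induction n with
  | zero =>
    intro i f hle hp
    obtain ⟨v, hv⟩ := pvGetSome arr 0 (by omega)
      (by have := List.length_pos_iff.mpr hp.1; omega)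
    simp [pvGoA, pvGoB, hv]
  | succ n ih =>
    intro i f hle hp
    by_cases hif : i ≥ f
    · obtain ⟨v, hv⟩ := pvGetSome arr 0 (by omega)
        (by have := List.length_pos_iff.mpr hp.1; omega)
      rw [pvGoA, pvGoB, if_pos hif, if_neg (by omega : ¬ i < f), hv]
      simp
    · have hb : 0 ≤ i ∧ f ≤ (arr.length : Int) := hp.2.resolve_left (by omega)
      rw [pvGoA, pvGoB, if_neg hif, if_pos (by omega : i < f)]
      have hmid : PySem.Int.floordiv (f + i) 2 = (f + i) / 2 :=
        PySem.Int.floordiv_eq_ediv_of_pos (by omega)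
      set m : Int := PySem.Int.floordiv (f + i) 2 with hmdef
      have hmb : i ≤ m ∧ m < f := by omega
      have hprel : Pre_elemento_desordenado_rec arr i m :=
        ⟨hp.1, Or.inr ⟨hb.1, by omega⟩⟩
      have ihl := ih i m (by omega) hprel
      dsimp only
      split_ifs with h1 h2 h3 h4
      · -- first boundary check fires in both ports
        obtain ⟨v, hv⟩ := pvGetSome arr (m + 1) (by omega) (by omega)
        refine ⟨by simp [hv], ?_⟩
        simp [pvCheck, h1.1, h1.2, hv]
      · -- second boundary check fires in both ports
        obtain ⟨v, hv⟩ := pvGetSome arr (m - 1) (by omega) (by omega)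
        refine ⟨by simp [hv], ?_⟩
        rw [pvCheck, if_neg h1, if_pos h2, hv]
      · -- no check fires: A's left recursion is some and preferred; B descends left
        refine ⟨h3, ?_⟩
        rw [pvCheck, if_neg h1, if_neg h2]
        exact ihl.2
      · exact absurd ihl.1 h3
      · exact absurd ihl.1 h3

-- ===== VERDICT (by name: the statement is the Claim_ definition above) =====
theorem elemento_desordenado_rec_spec : Claim_equal_elemento_desordenado_rec := by
  intro arr inicio fin _ hp
  exact (pvMain arr (fin - inicio).toNat inicio fin le_rfl hp).2
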